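-- pv_equiv track=rewrite | github.com/gring2/study_hard | codility/wantedly/test_one/solution.py | solution
-- ===== SOURCE A (Python) =====
-- import math
--
-- def solution(A):
--     A = list(str(A))
--
--     l = len(A)
--     half_l = math.ceil(l/2)
--
--     first = A[0: half_l]
--     result = ''
--     for i, x in enumerate(first):
--         result = result + x
--         lst_index = l - i - 1
--
--         if lst_index != i:
--
--            result = result + A[lst_index]
--
--
--     # last = A[half_l:][::-1]
--     #
--     # result = [None] * l
--     #
--     # for i, x in enumerate(result):
--     #     if i % 2 == 0:
--     #         result[i] = first.pop(0)
--     #     else: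
--     #         result[i] = last.pop(0)
--     #
--     return int(''.join(result))
-- ===== SOURCE B (Python) =====
-- def _interleave(xs, ys):
--     # take the head of xs, then continue with the roles of the two lists swapped
--     if not xs:
--         return []
--     return [xs[0]] + _interleave(ys, xs[1:])
--
-- def solution(A):
--     s = str(A)
--     half = (len(s) + 1) // 2
--     return int(''.join(_interleave(list(s[:half]), list(s[half:])[::-1])))
-- ===== Notes on version B (the rewrite author's own statement) =====
-- stated objective: alternative
-- what changed: B splits the digit string into its front half and the reversed back half and merges them with a head-swapping recursive interleave, instead of A's indexed loop that computes a mirror index l-i-1 and appends two characters per iteration.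
import Mathlib
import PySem

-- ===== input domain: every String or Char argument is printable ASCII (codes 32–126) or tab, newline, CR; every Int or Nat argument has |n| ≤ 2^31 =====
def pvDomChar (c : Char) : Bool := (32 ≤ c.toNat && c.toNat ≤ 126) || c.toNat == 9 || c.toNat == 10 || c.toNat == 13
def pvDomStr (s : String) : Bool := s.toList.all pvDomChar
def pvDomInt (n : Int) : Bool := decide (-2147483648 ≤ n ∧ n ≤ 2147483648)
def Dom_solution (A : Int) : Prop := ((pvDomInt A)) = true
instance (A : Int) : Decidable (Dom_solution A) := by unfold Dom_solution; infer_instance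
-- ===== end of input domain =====

-- B replaces A's mirror-index loop by a recursive interleave of the front half with the
-- reversed back half (a different decomposition; same cost). Return values only, no mutation.

-- ===== PORT A =====
-- A = list(str(A)); l = len(A); half_l = math.ceil(l/2); first = A[0:half_l];
-- result = '' ; for i, x in enumerate(first): result += x; if l-i-1 != i: result += A[l-i-1]
-- return int(''.join(result))
-- The Python string `result` is modeled as its list of characters (PySem.Str functions are
-- defined over List Char); math.ceil(l/2) = -((-l)//2), exact here since l is a small int;
-- the index l-i-1 is always in range (0 ≤ i < half_l ≤ l), so pyGetD's default is never used.
def solution (A : Int) : Int :=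
  let Alst : List Char := PySem.Int.toChars A
  let l : Int := Alst.length
  let half_l : Int := -(PySem.Int.floordiv (-l) 2)
  let first : List Char := PySem.List.slice Alst (some 0) (some half_l)
  let result : List Char :=
    (PySem.List.enumerate first).foldl
      (fun result p =>
        let result := result ++ [p.2]
        let lst_index := l - p.1 - 1
        if lst_index ≠ p.1 then result ++ [PySem.List.pyGetD Alst lst_index ' '] else result)
      []
  (PySem.Int.ofChars? result).getD 0

-- ===== PORT B =====
-- def _interleave(xs, ys): return [] if not xs else [xs[0]] + _interleave(ys, xs[1:])
def pvInterleave : List Char → List Char → List Char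
  | [], _ => []
  | x :: xs, ys => x :: pvInterleave ys xs
termination_by xs ys => xs.length + ys.length

-- s = str(A); half = (len(s)+1)//2; return int(''.join(_interleave(list(s[:half]), list(s[half:])[::-1])))
def solution_alt (A : Int) : Int :=
  let s : List Char := PySem.Int.toChars A
  let half : Nat := (s.length + 1) / 2
  (PySem.Int.ofChars? (pvInterleave (s.take half) ((s.drop half).reverse))).getD 0

-- ===== PRECONDITION & SPEC =====
def Spec_solution (A : Int) (out : Int) : Prop := out = solution_alt A
instance (A : Int) (out : Int) : Decidable (Spec_solution A out) := by unfold Spec_solution; infer_instance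

-- ===== CLAIM (what is proved, stated in full; the proofs are below) =====
def Claim_equal_solution : Prop := ∀ (A : Int), Dom_solution A → Spec_solution A (solution A)

-- ===== LEMMAS AND PROOFS =====

-- the per-iteration block A appends for the pair (i, x), as a function of the full list s
def pvBlk (s : List Char) (p : Int × Char) : List Char :=
  p.2 :: (if ((s.length : Int) - p.1 - 1) ≠ p.1
          then [PySem.List.pyGetD s ((s.length : Int) - p.1 - 1) ' '] else [])

theorem pvEnumerate_shift {α : Type} (t : List α) (k : Int) :
    PySem.List.enumerate t (k + 1) =
      (PySem.List.enumerate t k).map (fun p => (p.1 + 1, p.2)) := by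
  induction t generalizing k with
  | nil => simp [PySem.List.enumerate]
  | cons x xs ih => simp [PySem.List.enumerate_cons, ih]

theorem pvEnum_bounds_aux {α : Type} (t : List α) (k : Int) (p : Int × α)
    (h : p ∈ PySem.List.enumerate t k) : k ≤ p.1 ∧ p.1 < k + t.length := by
  induction t generalizing k with
  | nil => simp [PySem.List.enumerate] at h
  | cons x xs ih =>
    rw [PySem.List.enumerate_cons] at h
    rcases List.mem_cons.mp h with h1 | h2
    · subst h1; simp
    · have := ih (k + 1) h2; simp at this ⊢; omega

theorem pvMem_enumerate_bounds {α : Type} (t : List α) (p : Int × α)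
    (h : p ∈ PySem.List.enumerate t 0) : 0 ≤ p.1 ∧ p.1 < t.length := by
  have := pvEnum_bounds_aux t 0 p h; omega

-- A's fold, rewritten as a flatMap of per-index blocks
theorem pvFold_eq_flatMap (s : List Char) (t : List Char) :
    (PySem.List.enumerate t).foldl
      (fun result p =>
        let result := result ++ [p.2]
        let lst_index := (s.length : Int) - p.1 - 1
        if lst_index ≠ p.1 then result ++ [PySem.List.pyGetD s lst_index ' '] else result)
      [] = (PySem.List.enumerate t).flatMap (pvBlk s) := by
  have h := PySem.List.foldl_append_eq_flatMap (pvBlk s) (PySem.List.enumerate t) ([] : List Char)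
  simp only [List.nil_append] at h
  rw [← h]
  apply PySem.List.foldl_congr_mem
  intro acc p _
  simp only [pvBlk]
  split_ifs <;> simp

-- re-indexing a block from the extended list x :: (m ++ [y]) to the middle list m
theorem pvBlk_shift (x y : Char) (m : List Char) (p : Int × Char)
    (h0 : 0 ≤ p.1) (h1 : p.1 < ((m.length + 1) / 2 : Nat)) :
    pvBlk (x :: (m ++ [y])) (p.1 + 1, p.2) = pvBlk m p := by
  obtain ⟨i, c⟩ := p
  simp only at h0 h1
  have hm : ((m.length + 1) / 2 : Nat) ≤ m.length := by omega
  have hml : (1 : Int) ≤ (m.length : Int) - i := by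
    have : i < ((m.length : Int)) := by
      calc i < (((m.length + 1) / 2 : Nat) : Int) := h1
        _ ≤ (m.length : Int) := by exact_mod_cast hm
    omega
  have hlen : ((x :: (m ++ [y])).length : Int) = (m.length : Int) + 2 := by
    simp; omega
  simp only [pvBlk, hlen]
  have hidx : (m.length : Int) + 2 - (i + 1) - 1 = (m.length : Int) - i := by ring
  have hidx2 : (m.length : Int) - i - 1 = ((m.length : Int) - i) - 1 := by ring
  rw [hidx]
  have hcond : ((m.length : Int) - i ≠ i + 1) ↔ ((m.length : Int) - i - 1 ≠ i) := by
    constructor <;> intro h hc <;> apply h <;> omega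
  have hget : PySem.List.pyGetD (x :: (m ++ [y])) ((m.length : Int) - i) ' '
      = PySem.List.pyGetD m ((m.length : Int) - i - 1) ' ' := by
    rw [PySem.List.pyGetD_eq_getElem _ ' ' (by omega)
        (by rw [hlen]; omega),
        PySem.List.pyGetD_eq_getElem _ ' ' (by omega) (by omega)]
    have ht : ((m.length : Int) - i).toNat = ((m.length : Int) - i - 1).toNat + 1 := by omega
    have h? : (x :: (m ++ [y]))[((m.length : Int) - i).toNat]?
        = m[((m.length : Int) - i - 1).toNat]? := by
      rw [ht, List.getElem?_cons_succ, List.getElem?_append_left (by omega)]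
    rw [List.getElem?_eq_getElem (by simp; omega),
        List.getElem?_eq_getElem (by omega)] at h?
    exact Option.some.inj h?
  by_cases hc : ((m.length : Int) - i ≠ i + 1)
  · rw [if_pos hc, if_pos (hcond.mp hc), hget]
  · rw [if_neg hc, if_neg (fun h => hc (hcond.mpr h))]

-- key lemma: A's sequence of blocks equals B's interleave of the front half
-- with the reversed back half
theorem pvMain (s : List Char) :
    (PySem.List.enumerate (s.take ((s.length + 1) / 2))).flatMap (pvBlk s) =
      pvInterleave (s.take ((s.length + 1) / 2))
                   ((s.drop ((s.length + 1) / 2)).reverse) := by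
  induction s using List.bidirectionalRec with
  | nil => simp [pvInterleave]
  | singleton x =>
    simp [PySem.List.enumerate_cons, pvBlk, pvInterleave]
  | cons_append x m y ih =>
    have hlen : (x :: (m ++ [y])).length = m.length + 2 := by simp
    have hhalf : ((x :: (m ++ [y])).length + 1) / 2 = (m.length + 1) / 2 + 1 := by
      rw [hlen]; omega
    have hm : (m.length + 1) / 2 ≤ m.length := by omega
    rw [hhalf]
    have htake : (x :: (m ++ [y])).take ((m.length + 1) / 2 + 1)
        = x :: m.take ((m.length + 1) / 2) := by
      simp [List.take_append_of_le_length hm]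
    have hdrop : (x :: (m ++ [y])).drop ((m.length + 1) / 2 + 1)
        = m.drop ((m.length + 1) / 2) ++ [y] := by
      simp [List.drop_append_of_le_length hm]
    rw [htake, hdrop, List.reverse_append, List.reverse_singleton, List.singleton_append]
    rw [PySem.List.enumerate_cons, List.flatMap_cons]
    have hblk0 : pvBlk (x :: (m ++ [y])) (0, x) = [x, y] := by
      have hlen' : ((x :: (m ++ [y])).length : Int) = (m.length : Int) + 2 := by simp; omega
      simp only [pvBlk, hlen']
      rw [if_pos (by omega)]
      have hi : (m.length : Int) + 2 - 0 - 1 = ((m.length + 1 : Nat) : Int) := by push_cast; ring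
      rw [hi, PySem.List.pyGetD_natCast]
      simp
    rw [hblk0]
    rw [show pvInterleave (x :: m.take ((m.length + 1) / 2))
          (y :: (m.drop ((m.length + 1) / 2)).reverse)
        = x :: y :: pvInterleave (m.take ((m.length + 1) / 2))
            ((m.drop ((m.length + 1) / 2)).reverse) from by
      rw [pvInterleave, pvInterleave]]
    rw [show ((0 : Int) + 1) = 0 + 1 from rfl, pvEnumerate_shift, List.flatMap_map]
    simp only [List.cons_append, List.nil_append]
    rw [← ih]
    apply congrArg (List.cons x)
    apply congrArg (List.cons y)
    apply List.flatMap_congr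
    intro p hp
    have hb := pvMem_enumerate_bounds _ p hp
    have hlt : p.1 < ((m.take ((m.length + 1) / 2)).length : Int) := hb.2
    rw [List.length_take] at hlt
    exact pvBlk_shift x y m p hb.1 (by
      have : (min ((m.length + 1) / 2) m.length) = (m.length + 1) / 2 := by omega
      rw [this] at hlt; exact_mod_cast hlt)

-- A's ceil(l/2) slice is B's take of (len+1)/2
theorem pvHalf_eq (n : Nat) :
    -(PySem.Int.floordiv (-(n : Int)) 2) = (((n + 1) / 2 : Nat) : Int) := by
  rw [PySem.Int.neg_floordiv_neg_eq_iff_of_pos (by norm_num : (0:Int) < 2)]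
  omega

-- ===== VERDICT (by name: the statement is the Claim_ definition above) =====
theorem solution_spec : Claim_equal_solution := by
  intro A _
  unfold Spec_solution solution solution_alt
  simp only []
  set s := PySem.Int.toChars A with hs
  rw [pvHalf_eq s.length]
  rw [PySem.List.slice_zero_start, PySem.List.slice_to_natCast]
  rw [pvFold_eq_flatMap s (s.take ((s.length + 1) / 2))]
  rw [pvMain s]
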